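-- pv_equiv track=rewrite | github.com/JaggedParadigm/moonlighter_bayesian_bandit_pricing | moonlighter_pricing.py | move_allowed_tables_to_end
-- ===== SOURCE A (Python) =====
-- def move_allowed_tables_to_end(table_names):
--     return (
--         [
--             table_name
--             for table_name in table_names
--             if 'allowed_' not in table_name]
--         + [
--             table_name
--             for table_name in table_names
--             if 'allowed_' in table_name])
-- ===== SOURCE B (Python) =====
-- def move_allowed_tables_to_end(table_names):
--     return sorted(table_names, key=lambda name: 'allowed_' in name)
-- ===== Notes on version B (the rewrite author's own statement) =====
-- stated objective: idiomatic
-- what changed: Replaces the two filtering passes concatenated together with a single stable sort keyed on whether the name contains 'allowed_' (False sorts before True, stability preserves relative order).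
import Mathlib
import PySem

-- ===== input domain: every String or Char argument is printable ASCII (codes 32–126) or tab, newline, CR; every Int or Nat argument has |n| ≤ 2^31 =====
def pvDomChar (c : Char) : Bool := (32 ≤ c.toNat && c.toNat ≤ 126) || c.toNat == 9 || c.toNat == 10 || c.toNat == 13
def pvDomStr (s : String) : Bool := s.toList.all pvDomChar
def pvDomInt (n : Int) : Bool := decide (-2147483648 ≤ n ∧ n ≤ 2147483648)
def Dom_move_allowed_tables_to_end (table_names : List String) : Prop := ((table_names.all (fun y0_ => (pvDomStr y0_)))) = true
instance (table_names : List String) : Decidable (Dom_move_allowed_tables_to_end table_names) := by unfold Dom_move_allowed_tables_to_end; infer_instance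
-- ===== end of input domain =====

-- B replaces A's two filter passes + concatenation with one stable sort keyed on `'allowed_' in name` (idiomatic, same cost).


-- ===== PORT A =====
-- Two list comprehensions concatenated: names without 'allowed_' then names with it.
def move_allowed_tables_to_end (table_names : List String) : List String :=
  (table_names.filter (fun table_name => !(PySem.Str.isIn "allowed_" table_name)))
    ++ (table_names.filter (fun table_name => PySem.Str.isIn "allowed_" table_name))

-- ===== PORT B =====
-- One stable sort keyed on membership of 'allowed_' (False before True).
def move_allowed_tables_to_end_alt (table_names : List String) : List String :=
  PySem.List.sorted table_names (fun name => PySem.Str.isIn "allowed_" name) false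

-- ===== PRECONDITION & SPEC =====
def Spec_move_allowed_tables_to_end (table_names : List String) (out : List String) : Prop := out = move_allowed_tables_to_end_alt table_names
instance (table_names : List String) (out : List String) : Decidable (Spec_move_allowed_tables_to_end table_names out) := by unfold Spec_move_allowed_tables_to_end; infer_instance

-- ===== CLAIM (what is proved, stated in full; the proofs are below) =====
def Claim_equal_move_allowed_tables_to_end : Prop := ∀ (table_names : List String), Dom_move_allowed_tables_to_end table_names → Spec_move_allowed_tables_to_end table_names (move_allowed_tables_to_end table_names)

-- ===== LEMMAS AND PROOFS =====

-- Inserting x into a false-key block followed by a true-key block.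
theorem insertBy_false_true {α : Type} (k : α → Bool) (x : α) (F T : List α)
    (hF : ∀ y ∈ F, k y = false) (hT : ∀ y ∈ T, k y = true) :
    PySem.List.insertBy (fun a b => decide (k a < k b)) x (F ++ T) =
      if k x then F ++ T ++ [x] else F ++ x :: T := by
  induction F with
  | nil =>
    induction T with
    | nil => cases hx : k x <;> simp [PySem.List.insertBy]
    | cons t ts ih =>
      have ht : k t = true := hT t (by simp)
      have ih' := ih (fun y hy => hT y (by simp [hy]))
      cases hx : k x <;>
        simp_all [PySem.List.insertBy, Bool.lt_iff]
  | cons f fs ih =>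
    have hf : k f = false := hF f (by simp)
    have ih' := ih (fun y hy => hF y (by simp [hy]))
    cases hx : k x <;> simp_all [PySem.List.insertBy, Bool.lt_iff]

theorem foldl_insertBy_filters {α : Type} (k : α → Bool) (xs F T : List α)
    (hF : ∀ y ∈ F, k y = false) (hT : ∀ y ∈ T, k y = true) :
    xs.foldl (fun acc x => PySem.List.insertBy (fun a b => decide (k a < k b)) x acc) (F ++ T) =
      (F ++ xs.filter (fun x => !k x)) ++ (T ++ xs.filter k) := by
  induction xs generalizing F T with
  | nil => simp
  | cons x xs ih =>
    simp only [List.foldl_cons, insertBy_false_true k x F T hF hT]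
    cases hx : k x with
    | false =>
      have hF' : ∀ y ∈ F ++ [x], k y = false := by
        intro y hy; rcases List.mem_append.1 hy with h | h
        · exact hF y h
        · simp_all
      have := ih (F ++ [x]) T hF' hT
      simp only [List.append_assoc] at this
      simp only [List.filter_cons, hx]
      simpa using this
    | true =>
      have hT' : ∀ y ∈ T ++ [x], k y = true := by
        intro y hy; rcases List.mem_append.1 hy with h | h
        · exact hT y h
        · simp_all
      have := ih F (T ++ [x]) hF hT'
      simp only [List.append_assoc] at this
      simp only [List.filter_cons, hx]
      simpa using this

theorem sorted_bool_key_eq_filters {α : Type} (xs : List α) (k : α → Bool) :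
    PySem.List.sorted xs k false = xs.filter (fun x => !k x) ++ xs.filter k := by
  have := foldl_insertBy_filters k xs [] [] (by simp) (by simp)
  simpa [PySem.List.sorted] using this

-- ===== VERDICT (by name: the statement is the Claim_ definition above) =====
theorem move_allowed_tables_to_end_spec : Claim_equal_move_allowed_tables_to_end := by
  intro table_names _
  unfold Spec_move_allowed_tables_to_end move_allowed_tables_to_end move_allowed_tables_to_end_alt
  exact (sorted_bool_key_eq_filters table_names _).symm
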